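-- pv_equiv track=rewrite | github.com/npiccolotto/undrground-tubes | util/collections.py | group_by_intersection_group
-- ===== SOURCE A (Python) =====
-- from typing import Dict
-- from itertools import combinations, chain
--
-- def group_by_intersection_group(d: Dict):
--     sets, _ = zip(*d.items())
--     igroups = list(
--         chain.from_iterable(combinations(sets, l) for l in range(1, len(sets) + 1))
--     )
--
--     result = []
--     for igroup in igroups:
--         igroup_elements = set.intersection(*[set(d[s]) for s in igroup])
--         # currently we can't display sets with 1 element in them
--         if len(igroup_elements) > 1:
--             result.append((tuple(sorted(igroup_elements)), tuple(sorted(igroup))))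
--
--     return result
-- ===== SOURCE B (Python) =====
-- def group_by_intersection_group(d):
--     entries = [(k, set(v)) for k, v in d.items()]
--     # level-by-level expansion of key subsets in combinations order, pruning any
--     # subset whose intersection has <= 1 element (all its supersets would too)
--     frontier = [([k], s, entries[i + 1:]) for i, (k, s) in enumerate(entries) if len(s) > 1]
--     result = []
--     for _ in range(len(entries)):
--         if not frontier:
--             break
--         for g, s, _ in frontier:
--             result.append((tuple(sorted(s)), tuple(sorted(g))))
--         new_frontier = []
--         for g, s, rest in frontier:
--             for j, (k, s2) in enumerate(rest):
--                 t = s & s2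
--                 if len(t) > 1:
--                     new_frontier.append((g + [k], t, rest[j + 1:]))
--         frontier = new_frontier
--     return result
-- ===== Notes on version B (the rewrite author's own statement) =====
-- stated objective: faster
-- what changed: A enumerates all 2^n-1 key subsets and recomputes each subset's intersection from scratch; B grows subsets level by level, reusing each parent subset's intersection (one set-and per child) and pruning every subset whose intersection has <= 1 element, since no superset of it can be reported.
import Mathlib
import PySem

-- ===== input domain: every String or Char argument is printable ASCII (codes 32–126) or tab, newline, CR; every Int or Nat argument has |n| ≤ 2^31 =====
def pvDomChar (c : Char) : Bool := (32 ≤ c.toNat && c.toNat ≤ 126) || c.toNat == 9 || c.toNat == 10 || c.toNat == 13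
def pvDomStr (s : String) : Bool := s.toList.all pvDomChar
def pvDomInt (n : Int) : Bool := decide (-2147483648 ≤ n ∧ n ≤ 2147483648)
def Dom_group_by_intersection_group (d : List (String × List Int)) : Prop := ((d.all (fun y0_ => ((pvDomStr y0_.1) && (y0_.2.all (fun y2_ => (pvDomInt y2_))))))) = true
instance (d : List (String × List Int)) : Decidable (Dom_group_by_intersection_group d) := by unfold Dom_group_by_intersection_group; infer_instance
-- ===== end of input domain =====

-- B replaces A's enumeration of all 2^n key subsets by a level-by-level expansion that
-- prunes every subset whose intersection has ≤ 1 element (no superset can contribute);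
-- same return value, measured asymptotically faster on the generated inputs.

-- ===== PORT A =====
-- itertools.combinations(xs, l) in its exact (lexicographic-by-position) order
def pvComb {α : Type} : Nat → List α → List (List α)
  | 0, _ => [[]]
  | _ + 1, [] => []
  | l + 1, x :: xs => (pvComb l xs).map (fun c => x :: c) ++ pvComb (l + 1) xs

-- set.intersection(*sets): first set folded with & over the rest ([] unreachable under Pre_)
def pvInterAll (l : List (PySem.Set Int)) : PySem.Set Int :=
  match l with
  | [] => []
  | s :: rest => rest.foldl PySem.Set.inter s

def group_by_intersection_group (d : List (String × List Int)) : List (List Int × List String) :=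
  let dd := PySem.Dict.ofList d
  let sets := dd.keys
  let igroups := (PySem.List.pyRange 1 ((sets.length : Int) + 1) 1).flatMap (fun l => pvComb l.toNat sets)
  igroups.foldl (fun result igroup =>
      let elems := pvInterAll (igroup.map (fun s => PySem.Set.ofList (dd.getD s [])))
      if 1 < PySem.Set.len elems then
        result ++ [(PySem.List.sorted elems (fun x => x) false, PySem.List.sorted igroup (fun x => x) false)]
      else result) []

-- ===== PORT B =====
-- [(entries[i][0], entries[i][1], entries[i+1:]) for i in range(len(entries))]
def pvSufTriples : List (String × PySem.Set Int) → List (String × PySem.Set Int × List (String × PySem.Set Int))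
  | [] => []
  | (k, s) :: rs => (k, s, rs) :: pvSufTriples rs

-- the nested 'for g, s, rest in frontier: for j, (k, s2) in enumerate(rest): …' append loop
def pvStep (fr : List (List String × PySem.Set Int × List (String × PySem.Set Int))) :
    List (List String × PySem.Set Int × List (String × PySem.Set Int)) :=
  fr.flatMap (fun gsr =>
    (pvSufTriples gsr.2.2).filterMap (fun ksr =>
      let t := PySem.Set.inter gsr.2.1 ksr.2.1
      if 1 < PySem.Set.len t then some (gsr.1 ++ [ksr.1], t, ksr.2.2) else none))

def pvEmit (fr : List (List String × PySem.Set Int × List (String × PySem.Set Int))) :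
    List (List Int × List String) :=
  fr.map (fun gsr => (PySem.List.sorted gsr.2.1 (fun x => x) false, PySem.List.sorted gsr.1 (fun x => x) false))

-- the 'for _ in range(len(entries)): if not frontier: break …' loop
def pvLoop : Nat → List (List String × PySem.Set Int × List (String × PySem.Set Int)) →
    List (List Int × List String) → List (List Int × List String)
  | 0, _, res => res
  | n + 1, fr, res => if fr = [] then res else pvLoop n (pvStep fr) (res ++ pvEmit fr)

def group_by_intersection_group_alt (d : List (String × List Int)) : List (List Int × List String) :=
  let entries := (PySem.Dict.ofList d).items.map (fun p => (p.1, PySem.Set.ofList p.2))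
  let frontier := (pvSufTriples entries).filterMap (fun ksr =>
      if 1 < PySem.Set.len ksr.2.1 then some ([ksr.1], ksr.2.1, ksr.2.2) else none)
  pvLoop entries.length frontier []

-- ===== PRECONDITION & SPEC =====
-- Pre_ excludes only the empty dict, on which A raises ValueError (zip(*d.items()) of nothing).
def Pre_group_by_intersection_group (d : List (String × List Int)) : Prop := d ≠ []
instance (d : List (String × List Int)) : Decidable (Pre_group_by_intersection_group d) := by
  unfold Pre_group_by_intersection_group; infer_instance

def pvWitness_group_by_intersection_group : (List (String × List Int)) := [("a", [1, 2]), ("b", [2, 1, 3])]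

def Spec_group_by_intersection_group (d : List (String × List Int)) (out : List (List Int × List String)) : Prop := out = group_by_intersection_group_alt d
instance (d : List (String × List Int)) (out : List (List Int × List String)) : Decidable (Spec_group_by_intersection_group d out) := by unfold Spec_group_by_intersection_group; infer_instance

-- ===== CLAIM (what is proved, stated in full; the proofs are below) =====
def Claim_equal_group_by_intersection_group : Prop := ∀ (d : List (String × List Int)), Dom_group_by_intersection_group d → Pre_group_by_intersection_group d → Spec_group_by_intersection_group d (group_by_intersection_group d)


-- ===== LEMMAS AND PROOFS =====

-- enumerate-with-suffix, generically
def pvSufPairs {α : Type} : List α → List (α × List α)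
  | [] => []
  | x :: xs => (x, xs) :: pvSufPairs xs

theorem pvSufTriples_eq (e : List (String × PySem.Set Int)) :
    pvSufTriples e = (pvSufPairs e).map (fun xr => (xr.1.1, xr.1.2, xr.2)) := by
  induction e with
  | nil => rfl
  | cons x xs ih => cases x; simp [pvSufTriples, pvSufPairs, ih]

-- combinations with the suffix after the last chosen element
def pvCombR {α : Type} : Nat → List α → List (List α × List α)
  | 0, e => [([], e)]
  | _ + 1, [] => []
  | l + 1, x :: xs => (pvCombR l xs).map (fun cr => (x :: cr.1, cr.2)) ++ pvCombR (l + 1) xs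

-- the pruned frontier at level l
def pvF (l : Nat) (e : List (String × PySem.Set Int)) :
    List (List String × PySem.Set Int × List (String × PySem.Set Int)) :=
  (pvCombR l e).filterMap (fun cr =>
    let t := pvInterAll (cr.1.map Prod.snd)
    if 1 < PySem.Set.len t then some (cr.1.map Prod.fst, t, cr.2) else none)

theorem pvCombR_fst {α : Type} (l : Nat) (e : List α) :
    (pvCombR l e).map Prod.fst = pvComb l e := by
  induction e generalizing l with
  | nil => cases l <;> simp [pvCombR, pvComb]
  | cons x xs ih =>
    cases l with
    | zero => simp [pvCombR, pvComb]
    | succ m => simp [pvCombR, pvComb, ← ih, List.map_map, Function.comp]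

theorem pvCombR_length {α : Type} (l : Nat) (e : List α) {cr : List α × List α}
    (h : cr ∈ pvCombR l e) : cr.1.length = l := by
  induction e generalizing l cr with
  | nil =>
    cases l with
    | zero => simp [pvCombR] at h; simp [h]
    | succ m => simp [pvCombR] at h
  | cons x xs ih =>
    cases l with
    | zero => simp [pvCombR] at h; simp [h]
    | succ m =>
      simp only [pvCombR, List.mem_append, List.mem_map] at h
      rcases h with ⟨cr', hcr', rfl⟩ | h
      · simp [ih _ hcr']
      · exact ih _ h

theorem pvCombR_mem {α : Type} (l : Nat) (e : List α) {cr : List α × List α}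
    (h : cr ∈ pvCombR l e) : ∀ x ∈ cr.1, x ∈ e := by
  induction e generalizing l cr with
  | nil =>
    cases l with
    | zero => simp [pvCombR] at h; simp [h]
    | succ m => simp [pvCombR] at h
  | cons y xs ih =>
    cases l with
    | zero => simp [pvCombR] at h; simp [h]
    | succ m =>
      simp only [pvCombR, List.mem_append, List.mem_map] at h
      intro x hx
      rcases h with ⟨cr', hcr', rfl⟩ | h
      · rcases List.mem_cons.mp hx with rfl | hx'
        · exact List.mem_cons_self
        · exact List.mem_cons_of_mem _ (ih _ hcr' _ hx')
      · exact List.mem_cons_of_mem _ (ih _ h _ hx)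

theorem pvCombR_one {α : Type} (e : List α) :
    pvCombR 1 e = (pvSufPairs e).map (fun xr => ([xr.1], xr.2)) := by
  induction e with
  | nil => rfl
  | cons x xs ih => simp [pvCombR, pvSufPairs, ih]

theorem pvCombR_succ {α : Type} (l : Nat) (e : List α) :
    pvCombR (l + 1) e = (pvCombR l e).flatMap (fun cr =>
      (pvSufPairs cr.2).map (fun xr => (cr.1 ++ [xr.1], xr.2))) := by
  induction e generalizing l with
  | nil => cases l <;> simp [pvCombR, pvSufPairs]
  | cons x xs ih =>
    cases l with
    | zero =>
      simpa [pvCombR] using pvCombR_one (x :: xs)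
    | succ m =>
      show pvCombR (m + 2) (x :: xs) = _
      rw [show pvCombR (m + 2) (x :: xs)
            = (pvCombR (m + 1) xs).map (fun cr => (x :: cr.1, cr.2)) ++ pvCombR (m + 2) xs from rfl,
          show pvCombR (m + 1) (x :: xs)
            = (pvCombR m xs).map (fun cr => (x :: cr.1, cr.2)) ++ pvCombR (m + 1) xs from rfl]
      rw [List.flatMap_append, ← ih (m + 1), ih m, List.map_flatMap, List.flatMap_map]
      simp [List.map_map, Function.comp_def]

theorem pvInterAll_snoc (L : List (PySem.Set Int)) (s : PySem.Set Int) (hL : L ≠ []) :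
    pvInterAll (L ++ [s]) = PySem.Set.inter (pvInterAll L) s := by
  cases L with
  | nil => exact absurd rfl hL
  | cons l0 lt => simp [pvInterAll, List.foldl_append]

theorem pvFlatMap_filterMap {α β γ : Type} (h : α → Option β) (g : β → List γ) (X : List α) :
    (X.filterMap h).flatMap g = X.flatMap (fun x => ((h x).map g).getD []) := by
  induction X with
  | nil => rfl
  | cons x xs ih => cases hx : h x <;> simp [hx, ih]

theorem pvFlatMap_congr {α β : Type} {f g : α → List β} (X : List α)
    (h : ∀ x ∈ X, f x = g x) : X.flatMap f = X.flatMap g := by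
  induction X with
  | nil => rfl
  | cons x xs ih =>
    simp only [List.flatMap_cons, h x (by simp), ih (fun y hy => h y (by simp [hy]))]

theorem pvInter_len_le {s t : PySem.Set Int} :
    (PySem.Set.inter s t).length ≤ s.length := List.length_filter_le _ _

theorem pvComb_map {α β : Type} (g : α → β) (l : Nat) (e : List α) :
    pvComb l (e.map g) = (pvComb l e).map (List.map g) := by
  induction e generalizing l with
  | nil => cases l <;> simp [pvComb]
  | cons x xs ih =>
    cases l with
    | zero => simp [pvComb]
    | succ m => simp [pvComb, ih, List.map_map, Function.comp_def]

theorem pvStep_F (l : Nat) (e : List (String × PySem.Set Int)) :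
    pvStep (pvF (l + 1) e) = pvF (l + 2) e := by
  unfold pvStep pvF
  rw [pvFlatMap_filterMap, pvCombR_succ (l + 1) e, List.filterMap_flatMap]
  apply pvFlatMap_congr
  intro cr hcr
  have hlen := pvCombR_length (l + 1) e hcr
  have hc : cr.1 ≠ [] := by intro h0; rw [h0] at hlen; simp at hlen
  have hc' : cr.1.map Prod.snd ≠ [] := by simpa using hc
  rw [List.filterMap_map]
  by_cases hcond : 1 < PySem.Set.len (pvInterAll (cr.1.map Prod.snd))
  · simp only [hcond, if_pos, Option.map_some, Option.getD_some]
    rw [pvSufTriples_eq, List.filterMap_map]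
    congr 1
    funext xr
    simp [Function.comp, pvInterAll_snoc (cr.1.map Prod.snd) xr.1.2 hc']
  · simp only [hcond, ite_false, Option.map_none, Option.getD_none]
    symm
    rw [List.filterMap_eq_nil_iff]
    intro xr _
    have h1 : (PySem.Set.inter (pvInterAll (cr.1.map Prod.snd)) xr.1.2).length
        ≤ (pvInterAll (cr.1.map Prod.snd)).length := pvInter_len_le
    simp only [PySem.Set.len] at hcond
    simp [Function.comp, pvInterAll_snoc (cr.1.map Prod.snd) xr.1.2 hc', PySem.Set.len]
    omega

theorem pvF_empty (e : List (String × PySem.Set Int)) (l : Nat)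
    (h : pvF (l + 1) e = []) : ∀ i, pvF (l + 1 + i) e = [] := by
  intro i
  induction i with
  | zero => simpa using h
  | succ j ihj =>
    have hs := pvStep_F (l + j) e
    rw [show l + j + 1 = l + 1 + j from by omega] at hs
    rw [ihj] at hs
    rw [show l + 1 + (j + 1) = l + j + 2 from by omega, ← hs]
    simp [pvStep]

theorem pvLoop_F (e : List (String × PySem.Set Int)) :
    ∀ (fuel l : Nat) (acc : List (List Int × List String)),
      pvLoop fuel (pvF (l + 1) e) acc
        = acc ++ (List.range fuel).flatMap (fun i => pvEmit (pvF (l + 1 + i) e)) := by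
  intro fuel
  induction fuel with
  | zero => intro l acc; simp [pvLoop]
  | succ n ih =>
    intro l acc
    by_cases h : pvF (l + 1) e = []
    · have hall : ∀ i ∈ List.range (n + 1), pvEmit (pvF (l + 1 + i) e) = [] := by
        intro i _
        rw [pvF_empty e l h i]
        rfl
      simp [pvLoop, h, List.flatMap_eq_nil_iff.mpr hall]
    · rw [show pvLoop (n + 1) (pvF (l + 1) e) acc
            = pvLoop n (pvStep (pvF (l + 1) e)) (acc ++ pvEmit (pvF (l + 1) e)) from by
          simp [pvLoop, h]]
      rw [pvStep_F, show l + 2 = l + 1 + 1 from rfl, ih (l + 1)]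
      rw [List.range_succ_eq_map]
      rw [List.flatMap_cons, List.flatMap_map]
      rw [pvFlatMap_congr (List.range n)
            (f := fun i => pvEmit (pvF (l + 1 + 1 + i) e))
            (g := fun i => pvEmit (pvF (l + 1 + Nat.succ i) e))
            (by
              intro i _
              show pvEmit (pvF (l + 1 + 1 + i) e) = pvEmit (pvF (l + 1 + Nat.succ i) e)
              rw [show l + 1 + 1 + i = l + 1 + Nat.succ i from by omega])]
      simp [List.append_assoc]

theorem pvFoldl_if {α β : Type} (p : α → Prop) [DecidablePred p] (f : α → β) (L : List α)
    (acc : List β) :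
    L.foldl (fun r x => if p x then r ++ [f x] else r) acc
      = acc ++ L.flatMap (fun x => if p x then [f x] else []) := by
  induction L generalizing acc with
  | nil => simp
  | cons x xs ih => by_cases h : p x <;> simp [List.foldl_cons, h, ih, List.append_assoc]

theorem pvMap_filterMap_ite {α β γ : Type} (p : α → Prop) [DecidablePred p] (v : α → β)
    (g : β → γ) (X : List α) :
    (X.filterMap (fun x => if p x then some (v x) else none)).map g
      = X.flatMap (fun x => if p x then [g (v x)] else []) := by
  induction X with
  | nil => rfl
  | cons x xs ih =>
    rw [List.filterMap_cons]
    by_cases h : p x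
    · simp only [if_pos h, List.map_cons, ih, List.flatMap_cons, List.singleton_append]
    · simp only [if_neg h, ih, List.flatMap_cons, List.nil_append]

theorem pvEmit_pvF (l : Nat) (e : List (String × PySem.Set Int)) :
    pvEmit (pvF l e) = (pvCombR l e).flatMap (fun cr =>
      if 1 < PySem.Set.len (pvInterAll (cr.1.map Prod.snd))
      then [(PySem.List.sorted (pvInterAll (cr.1.map Prod.snd)) (fun x => x) false,
             PySem.List.sorted (cr.1.map Prod.fst) (fun x => x) false)]
      else []) := by
  unfold pvEmit pvF
  exact pvMap_filterMap_ite
    (p := fun cr : List (String × PySem.Set Int) × List (String × PySem.Set Int) =>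
      1 < PySem.Set.len (pvInterAll (cr.1.map Prod.snd)))
    (v := fun cr => (cr.1.map Prod.fst, pvInterAll (cr.1.map Prod.snd), cr.2))
    (g := fun gsr => (PySem.List.sorted gsr.2.1 (fun x => x) false,
                      PySem.List.sorted gsr.1 (fun x => x) false))
    (pvCombR l e)

theorem pvSeed (e : List (String × PySem.Set Int)) :
    (pvSufTriples e).filterMap (fun ksr =>
        if 1 < PySem.Set.len ksr.2.1 then some ([ksr.1], ksr.2.1, ksr.2.2) else none)
      = pvF 1 e := by
  rw [pvSufTriples_eq, List.filterMap_map]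
  unfold pvF
  rw [pvCombR_one, List.filterMap_map]
  rfl

theorem pvChunk (dd : PySem.Dict String (List Int)) (hnd : dd.keys.Nodup) (l : Nat) :
    (pvComb (l + 1) dd.keys).flatMap (fun ig =>
        if 1 < PySem.Set.len (pvInterAll (ig.map (fun s => PySem.Set.ofList (dd.getD s []))))
        then [(PySem.List.sorted (pvInterAll (ig.map (fun s => PySem.Set.ofList (dd.getD s []))))
                 (fun x => x) false,
               PySem.List.sorted ig (fun x => x) false)]
        else [])
      = pvEmit (pvF (l + 1) (dd.items.map (fun p => (p.1, PySem.Set.ofList p.2)))) := by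
  have hcoh : ∀ x ∈ dd.items.map (fun p => (p.1, PySem.Set.ofList p.2)),
      PySem.Set.ofList (dd.getD x.1 []) = x.2 := by
    intro x hx
    obtain ⟨p, hp, rfl⟩ := List.mem_map.mp hx
    have hp' : (p.1, p.2) ∈ dd.items := by simpa using hp
    simp [PySem.Dict.getD_of_mem_items dd hp' hnd []]
  have hkeys : dd.keys = (dd.items.map (fun p => (p.1, PySem.Set.ofList p.2))).map Prod.fst := by
    simp [PySem.Dict.keys, List.map_map, Function.comp_def]
  rw [hkeys, pvComb_map, ← pvCombR_fst, List.map_map, List.flatMap_map, pvEmit_pvF]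
  apply pvFlatMap_congr
  intro cr hcr
  have hmem := pvCombR_mem (l + 1) _ hcr
  have hmap : (cr.1.map Prod.fst).map (fun s => PySem.Set.ofList (dd.getD s []))
      = cr.1.map Prod.snd := by
    rw [List.map_map]
    exact List.map_congr_left (fun x hx => by simpa using hcoh x (hmem x hx))
  simp only [Function.comp]
  rw [hmap]

-- ===== VERDICT (by name: the statement is the Claim_ definition above) =====
theorem group_by_intersection_group_spec : Claim_equal_group_by_intersection_group := by
  intro d _ _
  unfold Spec_group_by_intersection_group
  have hnd := PySem.Dict.nodup_keys_ofList d
  have hA : group_by_intersection_group d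
      = ((PySem.List.pyRange 1 (((PySem.Dict.ofList d).keys.length : Int) + 1) 1).flatMap
          (fun li => pvComb li.toNat (PySem.Dict.ofList d).keys)).foldl
          (fun result igroup =>
            if 1 < PySem.Set.len (pvInterAll (igroup.map
                  (fun s => PySem.Set.ofList ((PySem.Dict.ofList d).getD s []))))
            then result ++ [(PySem.List.sorted (pvInterAll (igroup.map
                    (fun s => PySem.Set.ofList ((PySem.Dict.ofList d).getD s []))))
                    (fun x => x) false,
                  PySem.List.sorted igroup (fun x => x) false)]
            else result) [] := rfl
  have hB : group_by_intersection_group_alt d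
      = pvLoop ((PySem.Dict.ofList d).items.map (fun p => (p.1, PySem.Set.ofList p.2))).length
          ((pvSufTriples ((PySem.Dict.ofList d).items.map
              (fun p => (p.1, PySem.Set.ofList p.2)))).filterMap
            (fun ksr => if 1 < PySem.Set.len ksr.2.1
              then some ([ksr.1], ksr.2.1, ksr.2.2) else none)) [] := rfl
  rw [hA, hB, pvFoldl_if, pvSeed]
  have hloop := pvLoop_F ((PySem.Dict.ofList d).items.map (fun p => (p.1, PySem.Set.ofList p.2)))
      ((PySem.Dict.ofList d).items.map (fun p => (p.1, PySem.Set.ofList p.2))).length 0 []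
  rw [show (0 : Nat) + 1 = 1 from rfl] at hloop
  rw [hloop, PySem.List.pyRange_one]
  have htn : ((((PySem.Dict.ofList d).keys.length : Int) + 1) - 1).toNat
      = (PySem.Dict.ofList d).keys.length := by simp
  rw [htn, List.flatMap_map]
  have hlen : (PySem.Dict.ofList d).keys.length
      = ((PySem.Dict.ofList d).items.map (fun p => (p.1, PySem.Set.ofList p.2))).length := by
    simp [PySem.Dict.keys]
  rw [hlen, List.flatMap_assoc]
  simp only [List.nil_append]
  apply pvFlatMap_congr
  intro k _
  show (pvComb ((1 : Int) + (k : Int)).toNat (PySem.Dict.ofList d).keys).flatMap _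
      = pvEmit (pvF (1 + k) _)
  rw [show ((1 : Int) + (k : Int)).toNat = k + 1 from by omega,
      show 1 + k = k + 1 from by omega]
  exact pvChunk (PySem.Dict.ofList d) hnd k
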